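-- pv_equiv track=rewrite | github.com/karu9/adventcalendar2 | src/day7/day7_2.py | hasABABAB
-- ===== SOURCE A (Python) =====
-- def returnBAB(inp):
--     listBAB = []
--     for i in range(len(inp)-2):
--         if inp[i] == inp[i+2] and inp[i] != inp[i+1]:
--             listBAB.append("".join([inp[i+1], inp[i], inp[i+1]]))
--     return listBAB
--
-- def hasABABAB(outside, hypernet):
--     listBAB = []
--     for out in outside:
--         listBAB.extend(returnBAB(out))
--     hasABABAB = False
--     for BAB in listBAB:
--         for string in hypernet:
--             if BAB in string:
--                 hasABABAB = True
--     return hasABABAB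
-- ===== SOURCE B (Python) =====
-- def hasABABAB(outside, hypernet):
--     babs = {s[i + 1] + s[i] + s[i + 1]
--             for s in outside for i in range(len(s) - 2)
--             if s[i] == s[i + 2] and s[i] != s[i + 1]}
--     windows = {s[i:i + 3] for s in hypernet for i in range(len(s) - 2)}
--     return len(babs & windows) > 0
-- ===== Notes on version B (the rewrite author's own statement) =====
-- stated objective: faster
-- what changed: Replaces A's nested scan (every collected BAB substring-searched in every hypernet string) by building a set of BAB strings and a set of hypernet 3-character windows once and returning whether their intersection is nonempty.
import Mathlib
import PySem

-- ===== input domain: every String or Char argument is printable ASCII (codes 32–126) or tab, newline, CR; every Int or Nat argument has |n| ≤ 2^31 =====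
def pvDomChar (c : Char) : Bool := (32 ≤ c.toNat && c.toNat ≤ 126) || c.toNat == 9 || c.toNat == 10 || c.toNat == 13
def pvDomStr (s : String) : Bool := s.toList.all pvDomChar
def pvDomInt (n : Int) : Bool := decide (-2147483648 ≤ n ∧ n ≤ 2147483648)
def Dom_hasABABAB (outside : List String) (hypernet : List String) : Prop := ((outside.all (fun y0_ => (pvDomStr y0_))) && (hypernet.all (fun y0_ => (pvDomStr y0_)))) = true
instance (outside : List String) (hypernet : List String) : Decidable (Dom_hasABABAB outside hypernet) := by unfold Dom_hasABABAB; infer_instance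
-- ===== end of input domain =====

-- B replaces A's nested BAB-vs-hypernet substring scan by one set intersection: faster (set building + one intersection).


-- ===== PORT A =====
-- helper returnBAB: scan indices 0..len-3, collect "BAB" for each ABA window
def pvReturnBAB (inp : List Char) : List (List Char) :=
  (List.range (inp.length - 2)).foldl (fun acc i =>
    if inp.getD i ' ' == inp.getD (i+2) ' ' && !(inp.getD i ' ' == inp.getD (i+1) ' ')
    then acc ++ [[inp.getD (i+1) ' ', inp.getD i ' ', inp.getD (i+1) ' ']]
    else acc) []

def hasABABAB (outside : List String) (hypernet : List String) : Bool :=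
  let listBAB := outside.foldl (fun acc out => acc ++ pvReturnBAB out.toList) []
  listBAB.foldl (fun acc bab =>
    hypernet.foldl (fun acc2 s =>
      if PySem.Chars.isIn bab s.toList then true else acc2) acc) false

-- ===== PORT B =====
-- B-side: set of BABs from the outside strings (set comprehension)
def pvBabSet (outside : List String) : PySem.Set (List Char) :=
  PySem.Set.ofList (outside.flatMap (fun s =>
    ((List.range (s.toList.length - 2)).filter (fun i =>
        s.toList.getD i ' ' == s.toList.getD (i+2) ' ' &&
        !(s.toList.getD i ' ' == s.toList.getD (i+1) ' '))).map (fun i =>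
      [s.toList.getD (i+1) ' ', s.toList.getD i ' ', s.toList.getD (i+1) ' '])))

-- B-side: set of all 3-character windows of the hypernet strings (set comprehension; s[i:i+3])
def pvWindowSet (hypernet : List String) : PySem.Set (List Char) :=
  PySem.Set.ofList (hypernet.flatMap (fun s =>
    (List.range (s.toList.length - 2)).map (fun i => (s.toList.drop i).take 3)))

def hasABABAB_alt (outside : List String) (hypernet : List String) : Bool :=
  decide (0 < (PySem.Set.inter (pvBabSet outside) (pvWindowSet hypernet)).length)

-- ===== PRECONDITION & SPEC =====
def Spec_hasABABAB (outside : List String) (hypernet : List String) (out : Bool) : Prop := out = hasABABAB_alt outside hypernet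
instance (outside : List String) (hypernet : List String) (out : Bool) : Decidable (Spec_hasABABAB outside hypernet out) := by unfold Spec_hasABABAB; infer_instance

-- ===== CLAIM (what is proved, stated in full; the proofs are below) =====
def Claim_equal_hasABABAB : Prop := ∀ (outside : List String) (hypernet : List String), Dom_hasABABAB outside hypernet → Spec_hasABABAB outside hypernet (hasABABAB outside hypernet)

-- ===== LEMMAS AND PROOFS =====

-- the or-accumulating loop is List.any
theorem pv_foldl_or {α : Type} (p : α → Bool) (l : List α) (acc : Bool) :
    l.foldl (fun a x => if p x then true else a) acc = (acc || l.any p) := by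
  induction l generalizing acc with
  | nil => simp
  | cons x t ih =>
      simp only [List.foldl_cons, List.any_cons, ih]
      by_cases h : p x = true <;> simp [h]

theorem pvReturnBAB_eq (inp : List Char) :
    pvReturnBAB inp =
      ((List.range (inp.length - 2)).filter (fun i =>
          inp.getD i ' ' == inp.getD (i+2) ' ' && !(inp.getD i ' ' == inp.getD (i+1) ' '))).map
        (fun i => [inp.getD (i+1) ' ', inp.getD i ' ', inp.getD (i+1) ' ']) := by
  simpa using PySem.List.foldl_append_if _ _ (List.range (inp.length - 2)) []

theorem pv_mem_returnBAB_length {inp : List Char} {bab : List Char}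
    (h : bab ∈ pvReturnBAB inp) : bab.length = 3 := by
  rw [pvReturnBAB_eq] at h
  obtain ⟨i, _, rfl⟩ := List.mem_map.mp h
  rfl

-- substring test of a length-3 string = membership among the 3-windows
theorem pv_isIn_iff_window {bab s : List Char} (hlen : bab.length = 3) :
    PySem.Chars.isIn bab s = true ↔
      ∃ i ∈ List.range (s.length - 2), bab = (s.drop i).take 3 := by
  rw [PySem.Chars.isIn_iff_infix]
  constructor
  · rintro ⟨pre, suf, rfl⟩
    refine ⟨pre.length, ?_, ?_⟩
    · have := List.length_append (as := pre) (bs := bab ++ suf)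
      simp only [List.mem_range]
      simp [hlen, List.length_append]
      omega
    · rw [List.append_assoc, List.drop_left, ← hlen, List.take_left]
  · rintro ⟨i, hi, rfl⟩
    exact (List.take_prefix _ _).isInfix.trans (List.drop_suffix _ _).isInfix

-- the outer or-accumulating loop is List.any
theorem pv_foldl_or2 {α : Type} (g : α → Bool) (l : List α) (acc : Bool) :
    l.foldl (fun a x => a || g x) acc = (acc || l.any g) := by
  induction l generalizing acc with
  | nil => simp
  | cons x t ih => simp [ih, Bool.or_assoc]

theorem pv_A_eq_any (outside hypernet : List String) :
    hasABABAB outside hypernet =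
      (outside.flatMap (fun s => pvReturnBAB s.toList)).any (fun bab =>
        hypernet.any (fun h => PySem.Chars.isIn bab h.toList)) := by
  unfold hasABABAB
  rw [PySem.List.foldl_append_eq_flatMap]
  simp only [List.nil_append, pv_foldl_or, pv_foldl_or2, Bool.false_or]

theorem pv_B_iff (outside hypernet : List String) :
    hasABABAB_alt outside hypernet = true ↔
      ∃ bab, bab ∈ pvBabSet outside ∧ bab ∈ pvWindowSet hypernet := by
  unfold hasABABAB_alt
  rw [decide_eq_true_iff, List.length_pos_iff_exists_mem]
  unfold PySem.Set.inter
  constructor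
  · rintro ⟨x, hx⟩
    have := List.mem_filter.mp hx
    exact ⟨x, this.1, (PySem.Set.contains_iff _ _).mp this.2⟩
  · rintro ⟨x, h1, h2⟩
    exact ⟨x, List.mem_filter.mpr ⟨h1, (PySem.Set.contains_iff _ _).mpr h2⟩⟩

-- ===== VERDICT (by name: the statement is the Claim_ definition above) =====
theorem hasABABAB_spec : Claim_equal_hasABABAB := by
  intro outside hypernet _
  unfold Spec_hasABABAB
  rw [pv_A_eq_any]
  rcases Bool.eq_false_or_eq_true (hasABABAB_alt outside hypernet) with hB | hB
  · rw [hB]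
    obtain ⟨bab, hb, hw⟩ := (pv_B_iff outside hypernet).mp hB
    unfold pvBabSet at hb
    unfold pvWindowSet at hw
    rw [PySem.Set.mem_ofList] at hb hw
    obtain ⟨s, hs, hbs⟩ := List.mem_flatMap.mp hb
    obtain ⟨h, hh, hwh⟩ := List.mem_flatMap.mp hw
    rw [← pvReturnBAB_eq] at hbs
    obtain ⟨i, hi, hwin⟩ := List.mem_map.mp hwh
    apply List.any_eq_true.mpr
    refine ⟨bab, List.mem_flatMap.mpr ⟨s, hs, hbs⟩, ?_⟩
    apply List.any_eq_true.mpr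
    refine ⟨h, hh, ?_⟩
    exact (pv_isIn_iff_window (pv_mem_returnBAB_length hbs)).mpr ⟨i, hi, hwin.symm⟩
  · rw [hB]
    rw [← Bool.not_eq_true] at hB ⊢
    intro hA
    apply hB
    rw [pv_B_iff]
    obtain ⟨bab, hbab, hany⟩ := List.any_eq_true.mp hA
    obtain ⟨h, hh, hin⟩ := List.any_eq_true.mp hany
    obtain ⟨s, hs, hbs⟩ := List.mem_flatMap.mp hbab
    obtain ⟨i, hi, hwin⟩ := (pv_isIn_iff_window (pv_mem_returnBAB_length hbs)).mp hin
    refine ⟨bab, ?_, ?_⟩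
    · unfold pvBabSet
      rw [PySem.Set.mem_ofList]
      refine List.mem_flatMap.mpr ⟨s, hs, ?_⟩
      rw [pvReturnBAB_eq] at hbs
      exact hbs
    · unfold pvWindowSet
      rw [PySem.Set.mem_ofList]
      exact List.mem_flatMap.mpr ⟨h, hh, List.mem_map.mpr ⟨i, hi, hwin.symm⟩⟩
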